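-- pv_equiv track=rewrite | github.com/HGodal/Knowit_Julekalender | Jul 2021/dag14/dag14.py | is_nisse
-- ===== SOURCE A (Python) =====
-- from itertools import permutations as pms
--
-- def all_pairs(lst):
--     for p in pms(lst):
--         i = iter(p)
--         yield tuple(zip(i, i))
--
-- def is_nisse(inds, word):
--     if word[0] == 'n' or word[-1] == 'e':
--         return False
--
--     if not len(inds) == 4:
--         return False
--
--     if len(inds[2]) < 2:
--         return False
--
--     for n in inds[0]:
--         for i_ in inds[1]:
--             for ss in all_pairs(inds[2]):
--                 for e in inds[3]:
--                     valid = True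
--                     combo = [n, i_, ss[0][0], ss[0][1], e]
--                     for i in range(len(combo)-1):
--                         diff = combo[i+1] - combo[i]
--                         if diff <= 0 or diff > 3:
--                             valid = False
--                     if valid:
--                         return True
--     return False
-- ===== SOURCE B (Python) =====
-- def is_nisse(inds, word):
--     if word[0] == 'n' or word[-1] == 'e':
--         return False
--     if len(inds) != 4 or len(inds[2]) < 2:
--         return False
--     ns, is_, ss, es = inds
--
--     def ok(a, b):
--         return 0 < b - a <= 3
--
--     return any(
--         ok(n, i) and ok(i, ss[j]) and ok(ss[j], ss[k]) and ok(ss[k], e)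
--         for j in range(len(ss))
--         for k in range(len(ss)) if k != j
--         for n in ns
--         for i in is_
--         for e in es
--     )
-- ===== Notes on version B (the rewrite author's own statement) =====
-- stated objective: alternative
-- what changed: A enumerates permutations of inds[2] (via all_pairs) though it only ever reads the first pair of each pairing; B scans the ordered pairs of distinct positions of inds[2] directly and checks the gap chain n<i<s1<s2<e.
-- outside the precondition, e.g. on is_nisse([[1], [2], [4, 5], [8]], ''): A raises IndexError, B raises IndexError
import Mathlib
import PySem

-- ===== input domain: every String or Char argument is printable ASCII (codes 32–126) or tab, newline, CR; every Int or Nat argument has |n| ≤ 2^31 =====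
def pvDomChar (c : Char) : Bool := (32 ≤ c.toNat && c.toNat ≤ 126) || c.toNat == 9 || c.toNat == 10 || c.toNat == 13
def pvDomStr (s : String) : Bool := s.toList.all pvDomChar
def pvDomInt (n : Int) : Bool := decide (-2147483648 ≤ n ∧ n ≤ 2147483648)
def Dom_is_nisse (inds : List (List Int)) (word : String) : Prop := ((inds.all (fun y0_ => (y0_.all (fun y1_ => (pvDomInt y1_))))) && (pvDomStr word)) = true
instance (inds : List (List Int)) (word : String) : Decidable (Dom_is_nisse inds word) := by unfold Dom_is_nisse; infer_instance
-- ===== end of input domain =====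

-- B replaces A's enumeration of all permutations of inds[2] (A only ever uses the first
-- pair of each permutation's pairing) by a direct scan over ordered pairs of distinct
-- positions of inds[2]; objective: alternative (pair scan instead of permutation enumeration).

-- ===== PORT A =====
-- zip(i, i) over one iterator of p: consecutive disjoint pairs
def pvPairUp : List Int → List (Int × Int)
  | a :: b :: t => (a, b) :: pvPairUp t
  | _ => []

-- all_pairs(lst): one pairing per permutation (itertools order, PySem.List.permutations)
def pvAllPairs (lst : List Int) : List (List (Int × Int)) :=
  (PySem.List.permutations lst lst.length).map pvPairUp

-- the inner `valid` loop over range(len(combo)-1)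
def pvValidCombo (combo : List Int) : Bool :=
  (List.range (combo.length - 1)).foldl
    (fun valid i =>
      let diff := combo.getD (i+1) 0 - combo.getD i 0
      if diff ≤ 0 ∨ diff > 3 then false else valid) true

def is_nisse (inds : List (List Int)) (word : String) : Bool :=
  if PySem.Str.pyGet? word 0 = some 'n' ∨ PySem.Str.pyGet? word (-1) = some 'e' then false
  else if ¬ (inds.length = 4) then false
  else if (PySem.List.pyGetD inds 2 []).length < 2 then false
  else
    (PySem.List.pyGetD inds 0 []).any fun n =>
      (PySem.List.pyGetD inds 1 []).any fun i_ =>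
        (pvAllPairs (PySem.List.pyGetD inds 2 [])).any fun ss =>
          (PySem.List.pyGetD inds 3 []).any fun e =>
            pvValidCombo [n, i_, (ss.getD 0 (0, 0)).1, (ss.getD 0 (0, 0)).2, e]

-- ===== PORT B =====
-- ok(a, b): 0 < b - a <= 3
def pvOk (a b : Int) : Bool := decide (0 < b - a) && decide (b - a ≤ 3)

def is_nisse_alt (inds : List (List Int)) (word : String) : Bool :=
  if PySem.Str.pyGet? word 0 = some 'n' ∨ PySem.Str.pyGet? word (-1) = some 'e' then false
  else if inds.length ≠ 4 ∨ (PySem.List.pyGetD inds 2 []).length < 2 then false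
  else
    let ns := PySem.List.pyGetD inds 0 []
    let iss := PySem.List.pyGetD inds 1 []
    let ss := PySem.List.pyGetD inds 2 []
    let es := PySem.List.pyGetD inds 3 []
    (List.range ss.length).any fun j =>
      (List.range ss.length).any fun k =>
        decide (k ≠ j) &&
          (ns.any fun n => iss.any fun i => es.any fun e =>
            pvOk n i && pvOk i (ss.getD j 0) && pvOk (ss.getD j 0) (ss.getD k 0) &&
              pvOk (ss.getD k 0) e)

-- ===== PRECONDITION & SPEC =====
-- Pre_ excludes only the empty word, on which Python A (word[0]) raises IndexError (B raises there too).
def Pre_is_nisse (inds : List (List Int)) (word : String) : Prop := word.toList ≠ []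
instance (inds : List (List Int)) (word : String) : Decidable (Pre_is_nisse inds word) := by unfold Pre_is_nisse; infer_instance
def pvWitness_is_nisse : List (List Int) × String := ([[1], [2], [4, 5], [8]], "x")
def Spec_is_nisse (inds : List (List Int)) (word : String) (out : Bool) : Prop := out = is_nisse_alt inds word
instance (inds : List (List Int)) (word : String) (out : Bool) : Decidable (Spec_is_nisse inds word out) := by unfold Spec_is_nisse; infer_instance

-- ===== CLAIM (what is proved, stated in full; the proofs are below) =====
def Claim_equal_is_nisse : Prop := ∀ (inds : List (List Int)) (word : String), Dom_is_nisse inds word → Pre_is_nisse inds word → Spec_is_nisse inds word (is_nisse inds word)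

-- ===== LEMMAS AND PROOFS =====

lemma mem_perms_succ {s : List Int} {r : ℕ} {p : List Int} :
    p ∈ PySem.List.permutations s (r+1) ↔
      ∃ j, ∃ h : j < s.length, ∃ q ∈ PySem.List.permutations (s.eraseIdx j) r, p = s[j] :: q := by
  show p ∈ (List.range s.length).flatMap _ ↔ _
  rw [List.mem_flatMap]
  constructor
  · rintro ⟨j, hj, hp⟩
    rw [List.mem_range] at hj
    rw [List.getElem?_eq_getElem hj] at hp
    simp only [List.mem_map] at hp
    obtain ⟨q, hq, rfl⟩ := hp
    exact ⟨j, hj, q, hq, rfl⟩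
  · rintro ⟨j, hj, q, hq, rfl⟩
    refine ⟨j, List.mem_range.2 hj, ?_⟩
    rw [List.getElem?_eq_getElem hj]
    exact List.mem_map.2 ⟨q, hq, rfl⟩

lemma exists_mem_perms : ∀ (r : ℕ) (s : List Int), s.length = r →
    ∃ p, p ∈ PySem.List.permutations s r := by
  intro r
  induction r with
  | zero =>
    intro s _
    exact ⟨[], by show [] ∈ [[]]; simp⟩
  | succ r ih =>
    intro s hs
    have h0 : 0 < s.length := by omega
    obtain ⟨q, hq⟩ := ih (s.eraseIdx 0) (by rw [List.length_eraseIdx, if_pos h0]; omega)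
    exact ⟨s[0] :: q, mem_perms_succ.2 ⟨0, h0, q, hq, rfl⟩⟩

-- A's ∃ over permutations (A reads only the first pair) ↔ ∃ over ordered distinct positions
lemma exists_perm_pair (s : List Int) (h2 : 2 ≤ s.length) (Q : Int → Int → Prop) :
    (∃ p ∈ PySem.List.permutations s s.length,
        Q ((pvPairUp p).getD 0 (0, 0)).1 ((pvPairUp p).getD 0 (0, 0)).2) ↔
      ∃ j, ∃ hj : j < s.length, ∃ k, ∃ hk : k < s.length, k ≠ j ∧ Q s[j] s[k] := by
  obtain ⟨m, hm⟩ : ∃ m, s.length = m + 2 := ⟨s.length - 2, by omega⟩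
  constructor
  · rintro ⟨p, hp, hQ⟩
    rw [hm] at hp
    obtain ⟨j, hj, q, hq, rfl⟩ := mem_perms_succ.1 hp
    have htlen : (s.eraseIdx j).length = m + 1 := by simp [List.length_eraseIdx, hj]; omega
    obtain ⟨k', hk'0, q', hq', rfl⟩ := mem_perms_succ.1 hq
    have hk' : k' < m + 1 := htlen ▸ hk'0
    have hQ' : Q s[j] ((s.eraseIdx j)[k']'hk'0) := by simpa [pvPairUp] using hQ
    have hge := List.getElem_eraseIdx (l := s) (i := j) (j := k') hk'0
    by_cases hc : k' < j
    · rw [dif_pos hc] at hge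
      exact ⟨j, hj, k', by omega, by omega, by rwa [hge] at hQ'⟩
    · rw [dif_neg hc] at hge
      exact ⟨j, hj, k' + 1, by omega, by omega, by rwa [hge] at hQ'⟩
  · rintro ⟨j, hj, k, hk, hkj, hQ⟩
    have htlen : (s.eraseIdx j).length = m + 1 := by simp [List.length_eraseIdx, hj]; omega
    by_cases hc : k < j
    · have hkt : k < (s.eraseIdx j).length := by omega
      have hval : (s.eraseIdx j)[k]'hkt = s[k] := by
        rw [List.getElem_eraseIdx, dif_pos hc]
      obtain ⟨q', hq'⟩ := exists_mem_perms m ((s.eraseIdx j).eraseIdx k)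
        (by rw [List.length_eraseIdx, if_pos hkt, htlen]; omega)
      refine ⟨s[j] :: (s.eraseIdx j)[k]'hkt :: q', ?_, ?_⟩
      · rw [hm]
        exact mem_perms_succ.2 ⟨j, hj, _, mem_perms_succ.2 ⟨k, hkt, q', hq', rfl⟩, rfl⟩
      · simpa [pvPairUp, hval] using hQ
    · have hjk : j < k := by omega
      have hkt : k - 1 < (s.eraseIdx j).length := by omega
      have hval : (s.eraseIdx j)[k-1]'hkt = s[k] := by
        rw [List.getElem_eraseIdx, dif_neg (by omega : ¬ k - 1 < j)]
        simp only [show k - 1 + 1 = k from by omega]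
      obtain ⟨q', hq'⟩ := exists_mem_perms m ((s.eraseIdx j).eraseIdx (k-1))
        (by rw [List.length_eraseIdx, if_pos hkt, htlen]; omega)
      refine ⟨s[j] :: (s.eraseIdx j)[k-1]'hkt :: q', ?_, ?_⟩
      · rw [hm]
        exact mem_perms_succ.2 ⟨j, hj, _, mem_perms_succ.2 ⟨k-1, hkt, q', hq', rfl⟩, rfl⟩
      · simpa [pvPairUp, hval] using hQ

-- A's inner `valid` loop on the 5-element combo = B's conjunction of ok-steps
lemma validCombo_eq (a b c d e : Int) :
    pvValidCombo [a, b, c, d, e] = (pvOk a b && pvOk b c && pvOk c d && pvOk d e) := by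
  show (List.range 4).foldl _ true = _
  simp only [show List.range 4 = [0, 1, 2, 3] from rfl, List.foldl_cons, List.foldl_nil]
  simp only [pvOk, List.getD]
  split_ifs <;> simp_all <;> omega

-- the two `any`-nests agree once the guards have passed
lemma pv_core (ns iss s es : List Int) (h2 : 2 ≤ s.length) :
    (ns.any fun n => iss.any fun i_ => (pvAllPairs s).any fun ss => es.any fun e =>
        pvValidCombo [n, i_, (ss.getD 0 (0, 0)).1, (ss.getD 0 (0, 0)).2, e])
    = ((List.range s.length).any fun j => (List.range s.length).any fun k =>
        decide (k ≠ j) && (ns.any fun n => iss.any fun i => es.any fun e =>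
          pvOk n i && pvOk i (s.getD j 0) && pvOk (s.getD j 0) (s.getD k 0) &&
            pvOk (s.getD k 0) e)) := by
  rw [Bool.eq_iff_iff]
  simp only [List.any_eq_true, List.mem_range, Bool.and_eq_true, decide_eq_true_eq,
    pvAllPairs, List.mem_map]
  constructor
  · rintro ⟨n, hn, i, hi, ss, ⟨p, hp, rfl⟩, e, he, hv⟩
    obtain ⟨j, hj, k, hk, hkj, hq⟩ :=
      (exists_perm_pair s h2 (fun a b => pvValidCombo [n, i, a, b, e] = true)).1 ⟨p, hp, hv⟩
    rw [validCombo_eq] at hq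
    simp only [Bool.and_eq_true] at hq
    refine ⟨j, hj, k, hk, hkj, n, hn, i, hi, e, he, ?_⟩
    rw [List.getD_eq_getElem _ _ hj, List.getD_eq_getElem _ _ hk]
    exact ⟨⟨⟨hq.1.1.1, hq.1.1.2⟩, hq.1.2⟩, hq.2⟩
  · rintro ⟨j, hj, k, hk, hkj, n, hn, i, hi, e, he, hv⟩
    rw [List.getD_eq_getElem _ _ hj, List.getD_eq_getElem _ _ hk] at hv
    obtain ⟨p, hp, hq⟩ :=
      (exists_perm_pair s h2 (fun a b => pvValidCombo [n, i, a, b, e] = true)).2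
        ⟨j, hj, k, hk, hkj, by
          rw [validCombo_eq]
          simp only [Bool.and_eq_true]
          exact ⟨⟨⟨hv.1.1.1, hv.1.1.2⟩, hv.1.2⟩, hv.2⟩⟩
    exact ⟨n, hn, i, hi, pvPairUp p, ⟨p, hp, rfl⟩, e, he, hq⟩

-- ===== VERDICT (by name: the statement is the Claim_ definition above) =====
theorem is_nisse_spec : Claim_equal_is_nisse := by
  intro inds word _ _
  unfold Spec_is_nisse is_nisse is_nisse_alt
  by_cases hw : PySem.Str.pyGet? word 0 = some 'n' ∨ PySem.Str.pyGet? word (-1) = some 'e'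
  · rw [if_pos hw, if_pos hw]
  · rw [if_neg hw, if_neg hw]
    by_cases h4 : inds.length = 4
    · by_cases h2 : (PySem.List.pyGetD inds 2 []).length < 2
      · rw [if_neg (by simp [h4]), if_pos h2, if_pos (by simp [h4, h2])]
      · rw [if_neg (by simp [h4]), if_neg h2, if_neg (by simp [h4, h2])]
        exact pv_core _ _ _ _ (by omega)
    · rw [if_pos (by simp [h4]), if_pos (by simp [h4])]
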